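-- pv_equiv track=rewrite | github.com/LadnerLab/Protein-Oligo | protein_lib.py | get_unique_sequences
-- ===== SOURCE A (Python) =====
-- def get_unique_sequences( names_list, sequence_list ):
--     sequence_dict = {}
--     out_names, out_seqs = list(), list()
--
--     if len( names_list ) > 0:
--         for item in range( len( sequence_list ) ):
--             sequence_dict[ sequence_list[ item ] ] = names_list[ item ]
--
--         for sequence, name in sequence_dict.items():
--             out_names.append( name )
--             out_seqs.append( sequence )
--         return out_names, out_seqs
--     return [  ], sequence_list
-- ===== SOURCE B (Python) =====
-- def get_unique_sequences(names_list, sequence_list):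
--     if len(names_list) == 0:
--         return [], sequence_list
--     # backward pass: first hit from the right = last associated name
--     last_name = {}
--     for i in range(len(sequence_list) - 1, -1, -1):
--         seq = sequence_list[i]
--         if seq not in last_name:
--             last_name[seq] = names_list[i]
--     # forward pass: emit each sequence once, at its first occurrence
--     out_names, out_seqs = [], []
--     seen = set()
--     for seq in sequence_list:
--         if seq not in seen:
--             seen.add(seq)
--             out_names.append(last_name[seq])
--             out_seqs.append(seq)
--     return out_names, out_seqs
-- ===== Notes on version B (the rewrite author's own statement) =====
-- stated objective: alternative
-- what changed: B replaces A's forward overwrite-dict plus dict-items iteration by a backward first-wins pass that records each sequence's last name and a forward seen-set pass that emits each sequence at its first occurrence.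
import Mathlib
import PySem

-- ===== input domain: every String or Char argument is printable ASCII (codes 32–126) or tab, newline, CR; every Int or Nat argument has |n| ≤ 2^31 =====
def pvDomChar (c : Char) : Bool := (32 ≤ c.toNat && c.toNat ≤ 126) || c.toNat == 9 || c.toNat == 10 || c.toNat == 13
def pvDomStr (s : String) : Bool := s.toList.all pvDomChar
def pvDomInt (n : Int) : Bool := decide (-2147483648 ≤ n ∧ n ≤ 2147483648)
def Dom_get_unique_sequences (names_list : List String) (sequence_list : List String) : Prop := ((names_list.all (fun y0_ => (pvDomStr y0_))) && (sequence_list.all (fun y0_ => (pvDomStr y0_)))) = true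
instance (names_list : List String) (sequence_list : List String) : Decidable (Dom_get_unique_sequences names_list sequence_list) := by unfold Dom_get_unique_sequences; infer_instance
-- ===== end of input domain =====

-- B replaces A's forward overwrite-dict + dict-items iteration by a backward first-wins pass
-- (last name per sequence) and a forward seen-set pass (first occurrences); same O(n) cost.


-- ===== PORT A =====
-- pyGetD with default "" ports sequence_list[item] / names_list[item]: exact while the index is
-- in range, which Pre_ guarantees (Python raises IndexError outside it).
def get_unique_sequences (names_list : List String) (sequence_list : List String) : List String × List String :=
  if 0 < names_list.length then
    (((PySem.List.pyRange 0 (PySem.List.len sequence_list) 1).foldl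
        (fun d item =>
          d.insert (PySem.List.pyGetD sequence_list item "") (PySem.List.pyGetD names_list item ""))
        PySem.Dict.empty).items).foldl
      (fun acc p => (acc.1 ++ [p.2], acc.2 ++ [p.1])) ([], [])
  else ([], sequence_list)

-- ===== PORT B =====
-- last_name[seq] is ported as getD with default "": by construction every emitted seq is a key
-- (exact; no KeyError is reachable), and pyGetD "" ports the in-range indexing as in port A.
def get_unique_sequences_alt (names_list : List String) (sequence_list : List String) : List String × List String :=
  if names_list.length == 0 then ([], sequence_list)
  else
    let last_name : PySem.Dict String String :=
      (PySem.List.pyRange (PySem.List.len sequence_list - 1) (-1) (-1)).foldl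
        (fun d i =>
          if d.contains (PySem.List.pyGetD sequence_list i "") then d
          else d.insert (PySem.List.pyGetD sequence_list i "") (PySem.List.pyGetD names_list i ""))
        PySem.Dict.empty
    (sequence_list.foldl
      (fun acc seq =>
        if acc.2.contains seq then acc
        else ((acc.1.1 ++ [last_name.getD seq ""], acc.1.2 ++ [seq]), acc.2.add seq))
      (([], []), (PySem.Set.empty : PySem.Set String))).1

-- ===== PRECONDITION & SPEC =====
-- Pre_ excludes exactly the inputs where Python A raises IndexError: a nonempty names_list
-- shorter than sequence_list (names_list[item] is read for every index of sequence_list).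
def Pre_get_unique_sequences (names_list : List String) (sequence_list : List String) : Prop :=
  names_list ≠ [] → sequence_list.length ≤ names_list.length
instance (names_list : List String) (sequence_list : List String) : Decidable (Pre_get_unique_sequences names_list sequence_list) := by unfold Pre_get_unique_sequences; infer_instance
def pvWitness_get_unique_sequences : List String × List String := (["n1", "n2", "n3"], ["s", "t", "s"])
def Spec_get_unique_sequences (names_list : List String) (sequence_list : List String) (out : List String × List String) : Prop := out = get_unique_sequences_alt names_list sequence_list
instance (names_list : List String) (sequence_list : List String) (out : List String × List String) : Decidable (Spec_get_unique_sequences names_list sequence_list out) := by unfold Spec_get_unique_sequences; infer_instance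

-- ===== CLAIM (what is proved, stated in full; the proofs are below) =====
def Claim_equal_get_unique_sequences : Prop := ∀ (names_list : List String) (sequence_list : List String), Dom_get_unique_sequences names_list sequence_list → Pre_get_unique_sequences names_list sequence_list → Spec_get_unique_sequences names_list sequence_list (get_unique_sequences names_list sequence_list)

-- ===== LEMMAS AND PROOFS =====

-- The index→pair map: traversing range(len(sequence_list)) and indexing both lists is zip.
lemma pv_map_pairs (names seqs : List String) (h : seqs.length ≤ names.length) :
    (PySem.List.pyRange 0 (PySem.List.len seqs) 1).map
      (fun i => (PySem.List.pyGetD seqs i "", PySem.List.pyGetD names i "")) = seqs.zip names := by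
  apply List.ext_getElem
  · simp [PySem.List.length_pyRange_one, PySem.List.len]
    omega
  · intro i h1 h2
    have hi : i < seqs.length := by
      simpa [PySem.List.length_pyRange_one, PySem.List.len] using h1
    have hi' : i < names.length := lt_of_lt_of_le hi h
    simp only [List.getElem_map, PySem.List.getElem_pyRange_one, zero_add]
    simp [PySem.List.pyGetD_natCast, List.getD_eq_getElem?_getD, hi, hi', List.getElem_zip]

-- A's output loop over items is (values, keys).
lemma pv_items_out (items : List (String × String)) (ns ss : List String) :
    items.foldl (fun acc p => (acc.1 ++ [p.2], acc.2 ++ [p.1])) (ns, ss)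
      = (ns ++ items.map Prod.snd, ss ++ items.map Prod.fst) := by
  induction items generalizing ns ss with
  | nil => simp
  | cons p t ih => simp [List.foldl_cons, ih]

-- A's overwrite-insert fold: lookup = last binding, i.e. first in the reversed pair list.
lemma pv_get_insert_fold (ps : List (String × String)) (d : PySem.Dict String String) (k : String) :
    (ps.foldl (fun d p => d.insert p.1 p.2) d).get? k
      = (List.lookup k ps.reverse).or (d.get? k) := by
  induction ps generalizing d with
  | nil => simp
  | cons p t ih =>
    simp only [List.foldl_cons, List.reverse_cons, ih, List.lookup_append]
    by_cases hk : k = p.1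
    · simp [hk, List.lookup]
    · simp [PySem.Dict.get?_insert, hk, List.lookup, beq_false_of_ne hk]

-- B's guarded-insert fold: first binding wins.
lemma pv_get_guard_fold (qs : List (String × String)) (d : PySem.Dict String String) (k : String) :
    (qs.foldl (fun d p => if d.contains p.1 then d else d.insert p.1 p.2) d).get? k
      = (d.get? k).or (List.lookup k qs) := by
  induction qs generalizing d with
  | nil => simp
  | cons p t ih =>
    simp only [List.foldl_cons]
    by_cases hk : k = p.1
    · have hl : List.lookup k (p :: t) = some p.2 := by simp [List.lookup, hk]
      by_cases hc : d.contains p.1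
      · have hs : (d.get? k).isSome := by
          rw [← PySem.Dict.contains_eq_isSome_get?, hk]; exact hc
        rw [if_pos hc, ih, hl, Option.or_of_isSome hs, Option.or_of_isSome hs]
      · have hn : d.get? k = none := by
          rw [PySem.Dict.get?_eq_none_iff_contains, hk]; simpa using hc
        have hi2 : (d.insert p.1 p.2).get? k = some p.2 := by
          rw [hk]; exact PySem.Dict.get?_insert_self d p.1 p.2
        rw [if_neg hc, ih, hi2, hl, hn]
        simp [Option.or_of_isSome]
    · have hl : List.lookup k (p :: t) = List.lookup k t := by
        simp [List.lookup, beq_false_of_ne hk]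
      by_cases hc : d.contains p.1
      · rw [if_pos hc, ih, hl]
      · have hi2 : (d.insert p.1 p.2).get? k = d.get? k :=
          PySem.Dict.get?_insert_of_ne d p.2 hk
        rw [if_neg hc, ih, hi2, hl]

-- first occurrences not yet seen, in order (B's second pass, abstracted)
def pvEmit : PySem.Set String → List String → List String
  | _, [] => []
  | seen, s :: t => if seen.contains s then pvEmit seen t else s :: pvEmit (seen.add s) t

lemma pv_seen_fold (d : PySem.Dict String String) (l : List String)
    (seen : PySem.Set String) (ns ss : List String) :
    (l.foldl
      (fun acc seq =>
        if acc.2.contains seq then acc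
        else ((acc.1.1 ++ [d.getD seq ""], acc.1.2 ++ [seq]), acc.2.add seq))
      ((ns, ss), seen)).1
      = (ns ++ (pvEmit seen l).map (fun s => d.getD s ""), ss ++ pvEmit seen l) := by
  induction l generalizing seen ns ss with
  | nil => simp [pvEmit]
  | cons s t ih =>
    simp only [List.foldl_cons, pvEmit]
    by_cases hc : seen.contains s
    · rw [if_pos hc, if_pos hc, ih]
    · rw [if_neg hc, if_neg hc, ih]
      simp

lemma pv_emit_update (l : List String) (seen : PySem.Set String) :
    seen ++ pvEmit seen l = PySem.Set.update seen l := by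
  induction l generalizing seen with
  | nil => simp [pvEmit, PySem.Set.update]
  | cons s t ih =>
    have hu : PySem.Set.update seen (s :: t) = PySem.Set.update (seen.add s) t := rfl
    rw [hu, pvEmit]
    by_cases hc : seen.contains s
    · have hm : s ∈ seen := by simpa [PySem.Set.contains] using hc
      have ha : seen.add s = seen := by simp [PySem.Set.add, PySem.Set.contains, hm]
      rw [if_pos hc, ha, ih]
    · have hm : s ∉ seen := by simpa [PySem.Set.contains] using hc
      have ha : seen.add s = seen ++ [s] := by simp [PySem.Set.add, PySem.Set.contains, hm]
      rw [if_neg hc, ← ih (seen.add s), ha]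
      simp

lemma pv_main (names seqs : List String) (hnil : names ≠ [])
    (hlen : seqs.length ≤ names.length) :
    get_unique_sequences names seqs = get_unique_sequences_alt names seqs := by
  have hpos : 0 < names.length := List.length_pos_iff.mpr hnil
  have hmap := pv_map_pairs names seqs hlen
  -- A's dict is the overwrite fold over the zipped pairs
  have hfoldA :
      (PySem.List.pyRange 0 (PySem.List.len seqs) 1).foldl
        (fun d item =>
          d.insert (PySem.List.pyGetD seqs item "") (PySem.List.pyGetD names item ""))
        PySem.Dict.empty
      = (seqs.zip names).foldl (fun d p => d.insert p.1 p.2) PySem.Dict.empty := by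
    conv_rhs => rw [← hmap, List.foldl_map]
  -- B's dict is the guarded fold over the reversed zipped pairs
  have hrev : (PySem.List.pyRange (PySem.List.len seqs - 1) (-1) (-1)).map
      (fun i => (PySem.List.pyGetD seqs i "", PySem.List.pyGetD names i ""))
      = (seqs.zip names).reverse := by
    rw [show PySem.List.pyRange (PySem.List.len seqs - 1) (-1) (-1)
          = (PySem.List.pyRange 0 (PySem.List.len seqs) 1).reverse by
        rw [PySem.List.pyRange_neg_one_eq_reverse]; norm_num,
      List.map_reverse, hmap]
  have hfoldB :
      (PySem.List.pyRange (PySem.List.len seqs - 1) (-1) (-1)).foldl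
        (fun d i =>
          if d.contains (PySem.List.pyGetD seqs i "") then d
          else d.insert (PySem.List.pyGetD seqs i "") (PySem.List.pyGetD names i ""))
        PySem.Dict.empty
      = (seqs.zip names).reverse.foldl
          (fun d p => if d.contains p.1 then d else d.insert p.1 p.2) PySem.Dict.empty := by
    conv_rhs => rw [← hrev, List.foldl_map]
  -- both dicts have the same lookups
  have hgetA : ∀ k, ((seqs.zip names).foldl (fun d p => d.insert p.1 p.2)
      PySem.Dict.empty).get? k = List.lookup k (seqs.zip names).reverse := by
    intro k; rw [pv_get_insert_fold]; simp
  have hgetB : ∀ k, ((seqs.zip names).reverse.foldl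
      (fun d p => if d.contains p.1 then d else d.insert p.1 p.2)
      PySem.Dict.empty).get? k = List.lookup k (seqs.zip names).reverse := by
    intro k; rw [pv_get_guard_fold]; simp
  -- A's dict keys: the distinct sequences in first-occurrence order
  have hkeys : ((seqs.zip names).foldl (fun d p => d.insert p.1 p.2)
      PySem.Dict.empty).keys = PySem.Set.ofList seqs := by
    have h1 := PySem.Dict.keys_foldl_insert_key (ν := String) (seqs.zip names)
      Prod.fst (fun _ p => p.2) PySem.Dict.empty
    simpa [List.map_fst_zip hlen, PySem.Set.update, PySem.Set.ofList,
      PySem.Set.empty] using h1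
  have hnodup : ((seqs.zip names).foldl (fun d p => d.insert p.1 p.2)
      PySem.Dict.empty).keys.Nodup :=
    PySem.Dict.nodup_keys_foldl_insert_key (ν := String) (seqs.zip names)
      Prod.fst (fun _ p => p.2) PySem.Dict.empty (by simp)
  -- evaluate A
  have hA : get_unique_sequences names seqs
      = ((PySem.Set.ofList seqs).map
          (fun k => (List.lookup k (seqs.zip names).reverse).getD ""),
         PySem.Set.ofList seqs) := by
    rw [get_unique_sequences, if_pos hpos, hfoldA, pv_items_out,
      PySem.Dict.items_eq_map_keys _ hnodup "", hkeys]
    simp only [List.map_map, List.nil_append, Function.comp_def]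
    refine congrArg₂ Prod.mk ?_ (by simp)
    apply List.map_congr_left; intro k _
    simp [PySem.Dict.getD_eq_get?_getD, hgetA k]
  -- evaluate B
  have hemit : pvEmit PySem.Set.empty seqs = PySem.Set.ofList seqs := by
    have h2 := pv_emit_update seqs PySem.Set.empty
    simpa [PySem.Set.empty, PySem.Set.update, PySem.Set.ofList] using h2
  have hB : get_unique_sequences_alt names seqs
      = ((PySem.Set.ofList seqs).map
          (fun k => (List.lookup k (seqs.zip names).reverse).getD ""),
         PySem.Set.ofList seqs) := by
    rw [get_unique_sequences_alt]
    rw [if_neg (by simpa using hnil)]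
    simp only [hfoldB]
    rw [pv_seen_fold, hemit]
    simp only [List.nil_append]
    refine congrArg₂ Prod.mk ?_ rfl
    apply List.map_congr_left; intro k _
    rw [PySem.Dict.getD_eq_get?_getD, hgetB k]
  rw [hA, hB]

-- ===== VERDICT (by name: the statement is the Claim_ definition above) =====
theorem get_unique_sequences_spec : Claim_equal_get_unique_sequences := by
  intro names seqs _ hpre
  unfold Spec_get_unique_sequences
  by_cases hnil : names = []
  · subst hnil
    simp [get_unique_sequences, get_unique_sequences_alt]
  · exact pv_main names seqs hnil (hpre hnil)
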